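-- pv_equiv track=rewrite | github.com/mateoguaman/LaMer | scripts/test_remote_env.py | _fixed_actions
-- ===== SOURCE A (Python) =====
-- def _fixed_actions(num_processes, num_actions_per_turn=3):
--     """Return a deterministic list of text actions."""
--     directions = ["up", "down", "left", "right"]
--     actions = []
--     for i in range(num_processes):
--         acts = ",".join(
--             directions[(i + j) % len(directions)]
--             for j in range(num_actions_per_turn)
--         )
--         actions.append(f"<action>{acts}</action>")
--     return actions
-- ===== SOURCE B (Python) =====
-- def _fixed_actions(num_processes, num_actions_per_turn=3):
--     """Return a deterministic list of text actions."""
--     if num_processes <= 0: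
--         return []
--     directions = ["up", "down", "left", "right"]
--     k = max(0, num_actions_per_turn)
--     reps = directions * (k // 4 + 2)
--     base = ["<action>" + ",".join(reps[r:r + k]) + "</action>" for r in range(4)]
--     return [base[i % 4] for i in range(num_processes)]
-- ===== Notes on version B (the rewrite author's own statement) =====
-- stated objective: faster
-- what changed: B builds a repeated directions list once and slices it to get the 4 distinct action strings (one per residue i % 4, with no per-element modular indexing), then fills the output by indexing that 4-entry table, instead of rebuilding the modular join for every process.
import Mathlib
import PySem

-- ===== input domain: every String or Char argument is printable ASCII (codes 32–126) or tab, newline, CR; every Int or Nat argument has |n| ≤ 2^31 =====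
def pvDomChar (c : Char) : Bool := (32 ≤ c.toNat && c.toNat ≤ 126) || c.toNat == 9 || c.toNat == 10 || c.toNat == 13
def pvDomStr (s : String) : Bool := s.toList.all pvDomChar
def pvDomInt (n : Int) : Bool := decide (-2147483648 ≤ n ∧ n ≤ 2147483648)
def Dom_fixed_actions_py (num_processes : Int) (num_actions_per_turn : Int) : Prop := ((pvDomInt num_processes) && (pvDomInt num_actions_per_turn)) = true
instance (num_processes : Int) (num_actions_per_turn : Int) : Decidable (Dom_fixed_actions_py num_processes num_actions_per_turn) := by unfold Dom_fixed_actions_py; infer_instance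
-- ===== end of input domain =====

-- B replaces A's per-process modular join by a repeated directions list that is sliced once per
-- residue class (4 slices total), then fills the output by indexing that 4-entry table.

-- ===== PORT A =====
def fixed_actions_py (num_processes : Int) (num_actions_per_turn : Int) : List String :=
  let directions : List String := ["up", "down", "left", "right"]
  (PySem.List.pyRange 0 num_processes 1).foldl (fun actions i =>
    let acts : String := PySem.Str.join ","
      ((PySem.List.pyRange 0 num_actions_per_turn 1).map (fun j =>
        PySem.List.pyGetD directions (PySem.Int.mod (i + j) 4) ""))
    actions ++ ["<action>" ++ acts ++ "</action>"]) []

-- ===== PORT B =====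
def fixed_actions_py_alt (num_processes : Int) (num_actions_per_turn : Int) : List String :=
  if num_processes ≤ 0 then [] else
  let directions : List String := ["up", "down", "left", "right"]
  let k : Int := max 0 num_actions_per_turn
  let reps : List String := PySem.List.pyRepeat directions (PySem.Int.floordiv k 4 + 2)
  let base : List String := (PySem.List.pyRange 0 4 1).map (fun r =>
    "<action>" ++ PySem.Str.join "," (PySem.List.slice reps (some r) (some (r + k))) ++ "</action>")
  (PySem.List.pyRange 0 num_processes 1).map (fun i =>
    PySem.List.pyGetD base (PySem.Int.mod i 4) "")

-- ===== PRECONDITION & SPEC =====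
def Spec_fixed_actions_py (num_processes : Int) (num_actions_per_turn : Int) (out : List String) : Prop := out = fixed_actions_py_alt num_processes num_actions_per_turn
instance (num_processes : Int) (num_actions_per_turn : Int) (out : List String) : Decidable (Spec_fixed_actions_py num_processes num_actions_per_turn out) := by unfold Spec_fixed_actions_py; infer_instance

-- ===== CLAIM (what is proved, stated in full; the proofs are below) =====
def Claim_equal_fixed_actions_py : Prop := ∀ (num_processes : Int) (num_actions_per_turn : Int), Dom_fixed_actions_py num_processes num_actions_per_turn → Spec_fixed_actions_py num_processes num_actions_per_turn (fixed_actions_py num_processes num_actions_per_turn)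

-- ===== LEMMAS AND PROOFS =====

-- the action string for process index i (the shape of A's inner computation)
def pvInner (napt : Int) (i : Int) : String :=
  "<action>" ++ PySem.Str.join ","
    ((PySem.List.pyRange 0 napt 1).map (fun j =>
      PySem.List.pyGetD ["up", "down", "left", "right"] (PySem.Int.mod (i + j) 4) "")) ++ "</action>"

-- the inner string depends on i only through i % 4
theorem pvInner_mod (napt i : Int) : pvInner napt i = pvInner napt (PySem.Int.mod i 4) := by
  unfold pvInner
  congr 2
  congr 1
  apply List.map_congr_left
  intro j _
  congr 1
  have h4 : (0:Int) < 4 := by norm_num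
  rw [PySem.Int.mod_eq_emod_of_pos h4, PySem.Int.mod_eq_emod_of_pos h4,
      PySem.Int.mod_eq_emod_of_pos h4]
  rw [Int.add_emod i j, Int.add_emod (i % 4) j, Int.emod_emod_of_dvd _ (by norm_num)]

theorem fixed_actions_py_eq_map (np napt : Int) :
    fixed_actions_py np napt = (PySem.List.pyRange 0 np 1).map (pvInner napt) := by
  show (PySem.List.pyRange 0 np 1).foldl (fun actions i =>
      actions ++ ["<action>" ++ PySem.Str.join ","
        ((PySem.List.pyRange 0 napt 1).map (fun j =>
          PySem.List.pyGetD ["up", "down", "left", "right"] (PySem.Int.mod (i + j) 4) "")) ++ "</action>"]) [] = _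
  rw [PySem.List.foldl_append_singleton_eq_map]
  rfl

-- element of the repeated directions list, by Nat index
theorem pvRep_getD (m i : Nat) (h : i < 4 * m) :
    ((List.replicate m (["up", "down", "left", "right"] : List String)).flatten).getD i ""
      = (["up", "down", "left", "right"] : List String).getD (i % 4) "" := by
  induction m generalizing i with
  | zero => omega
  | succ m ih =>
    rw [List.replicate_succ, List.flatten_cons]
    by_cases hi : i < 4
    · rw [List.getD_append (["up", "down", "left", "right"] : List String) _ "" i (by simpa using hi),
         Nat.mod_eq_of_lt hi]
    · rw [List.getD_append_right (["up", "down", "left", "right"] : List String) _ "" i (by simpa using hi)]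
      simp only [List.length_cons, List.length_nil]
      rw [ih (i - 4) (by omega)]
      congr 1
      omega

-- the sliced repeated list equals A's modular-index comprehension
theorem pvSlice_eq (napt r : Int) (h0 : 0 ≤ r) (h1 : r < 4) :
    PySem.List.slice
      (PySem.List.pyRepeat (["up", "down", "left", "right"] : List String)
        (PySem.Int.floordiv (max 0 napt) 4 + 2))
      (some r) (some (r + max 0 napt))
    = (PySem.List.pyRange 0 napt 1).map (fun j =>
        PySem.List.pyGetD ["up", "down", "left", "right"] (PySem.Int.mod (r + j) 4) "") := by
  have hfd : PySem.Int.floordiv (max 0 napt) 4 = (max 0 napt) / 4 :=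
    PySem.Int.floordiv_eq_ediv_of_pos (by norm_num)
  have hlen : ((List.replicate (PySem.Int.floordiv (max 0 napt) 4 + 2).toNat
      (["up", "down", "left", "right"] : List String)).flatten).length
      = 4 * (PySem.Int.floordiv (max 0 napt) 4 + 2).toNat := by
    simp [List.length_flatten, List.map_replicate, List.sum_replicate, smul_eq_mul, Nat.mul_comm]
  have hbig : r.toNat + (max 0 napt).toNat ≤ 4 * (PySem.Int.floordiv (max 0 napt) 4 + 2).toNat := by
    rw [hfd]; omega
  rw [PySem.List.pyRepeat, PySem.List.slice_toNat _ h0 (by omega), PySem.List.pyRange_one]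
  apply List.ext_getElem
  · simp only [List.length_take, List.length_drop, List.length_map, List.length_range, hlen]
    omega
  · intro n h1' h2'
    have hn : n < (max 0 napt).toNat := by
      simp only [List.length_map, List.length_range] at h2'
      omega
    have hidxlt : r.toNat + n < ((List.replicate (PySem.Int.floordiv (max 0 napt) 4 + 2).toNat
        (["up", "down", "left", "right"] : List String)).flatten).length := by
      rw [hlen]; omega
    rw [List.getElem_take, List.getElem_drop, List.getElem_map, List.getElem_map, List.getElem_range]
    simp only [zero_add]
    rw [← List.getD_eq_getElem _ "" hidxlt, pvRep_getD _ _ (by omega)]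
    have h4 : (0:Int) < 4 := by norm_num
    rw [PySem.Int.mod_eq_emod_of_pos h4]
    have hb0 : 0 ≤ (r + (n:Int)) % 4 := Int.emod_nonneg _ (by norm_num)
    have hb1 : (r + (n:Int)) % 4 < 4 := Int.emod_lt_of_pos _ h4
    rw [PySem.List.pyGetD_eq_getElem _ "" hb0 (by simp only [List.length_cons, List.length_nil]; omega)]
    have ht : ((r + (n:Int)) % 4).toNat = (r.toNat + n) % 4 := by omega
    rw [List.getD_eq_getElem _ "" (by simp only [List.length_cons, List.length_nil]; omega)]
    simp only [ht]

theorem fixed_actions_py_alt_eq_map (np napt : Int) :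
    fixed_actions_py_alt np napt
      = (PySem.List.pyRange 0 np 1).map (fun i => pvInner napt (PySem.Int.mod i 4)) := by
  by_cases hnp : np ≤ 0
  · show (if np ≤ 0 then [] else _) = _
    rw [if_pos hnp, PySem.List.pyRange_one_eq_nil hnp, List.map_nil]
  rw [fixed_actions_py_alt, if_neg hnp]
  show (PySem.List.pyRange 0 np 1).map (fun i =>
      PySem.List.pyGetD ((PySem.List.pyRange 0 4 1).map (fun r =>
        "<action>" ++ PySem.Str.join ","
          (PySem.List.slice
            (PySem.List.pyRepeat (["up", "down", "left", "right"] : List String)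
              (PySem.Int.floordiv (max 0 napt) 4 + 2))
            (some r) (some (r + max 0 napt))) ++ "</action>"))
        (PySem.Int.mod i 4) "") = _
  apply List.map_congr_left
  intro i hi
  rw [PySem.List.mem_pyRange_one] at hi
  have h4 : (0:Int) < 4 := by norm_num
  have h0 : 0 ≤ PySem.Int.mod i 4 := PySem.Int.mod_nonneg i h4
  have h1 : PySem.Int.mod i 4 < 4 := by
    rw [PySem.Int.mod_eq_emod_of_pos h4]; exact Int.emod_lt_of_pos i h4
  rw [PySem.List.pyGetD_map_pyRange_of_nonneg _ _ _ _ h0 h1]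
  rw [pvSlice_eq napt (PySem.Int.mod i 4) h0 h1]
  rfl

-- ===== VERDICT (by name: the statement is the Claim_ definition above) =====
theorem fixed_actions_py_spec : Claim_equal_fixed_actions_py := by
  intro np napt _
  unfold Spec_fixed_actions_py
  rw [fixed_actions_py_eq_map, fixed_actions_py_alt_eq_map]
  apply List.map_congr_left
  intro i _
  exact pvInner_mod napt i
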